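-- pv_equiv track=rewrite | github.com/nicklave/Progetti_esercizi_unical | Esercizi_python/list_somma=0.py | funzione
-- ===== SOURCE A (Python) =====
-- def funzione(lista, k):
--     for i in range(len(lista) - k + 1):
--         temp = lista[i]
--         for j in range(i + 1, k + i):
--             temp += lista[j]
--
--         if temp == 0:
--             return True
--     return False
-- ===== SOURCE B (Python) =====
-- def funzione(lista, k):
--     n = len(lista)
--     if k > n:
--         return False
--     s = sum(lista[:k])
--     if s == 0:
--         return True
--     for i in range(k, n):
--         s += lista[i] - lista[i - k]
--         if s == 0:
--             return True
--     return False
-- ===== Notes on version B (the rewrite author's own statement) =====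
-- stated objective: faster
-- what changed: Replaces the nested loop that re-sums every k-window from scratch with a single sliding-window pass that updates one running sum by adding the entering element and subtracting the leaving one.
-- outside the precondition, e.g. on funzione([1, 0, 2], -1): A returns True, B raises IndexError; on funzione([0], 0): A returns True, B returns True
import Mathlib
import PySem

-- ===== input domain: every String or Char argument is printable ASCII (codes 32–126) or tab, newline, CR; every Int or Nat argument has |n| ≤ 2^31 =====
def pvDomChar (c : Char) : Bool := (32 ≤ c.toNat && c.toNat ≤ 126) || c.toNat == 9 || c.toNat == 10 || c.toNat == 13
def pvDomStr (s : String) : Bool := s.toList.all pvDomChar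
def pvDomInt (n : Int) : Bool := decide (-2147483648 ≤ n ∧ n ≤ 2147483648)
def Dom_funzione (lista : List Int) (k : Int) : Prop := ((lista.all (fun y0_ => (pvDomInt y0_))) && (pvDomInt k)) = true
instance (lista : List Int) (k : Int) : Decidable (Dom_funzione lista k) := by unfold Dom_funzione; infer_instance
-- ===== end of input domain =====

-- B replaces A's per-window re-summation (nested loops) with one sliding-window pass
-- keeping a running sum: an asymptotic O(n*k) → O(n) speed-up; return value unchanged on Pre_.

-- ===== PORT A =====
-- inner loop 'for j in range(i+1, k+i): temp += lista[j]' and outer early-return loop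
def funzioneGo (lista : List Int) (k : Int) : List Int → Bool
  | [] => false
  | i :: rest =>
      let temp := (PySem.List.pyRange (i + 1) (k + i) 1).foldl
        (fun t j => t + PySem.List.pyGetD lista j 0) (PySem.List.pyGetD lista i 0)
      if temp = 0 then true else funzioneGo lista k rest

def funzione (lista : List Int) (k : Int) : Bool :=
  funzioneGo lista k (PySem.List.pyRange 0 ((lista.length : Int) - k + 1) 1)

-- ===== PORT B =====
-- sliding-window loop 'for i in range(k, n): s += lista[i] - lista[i-k]; if s == 0: return True'
def slideGo (lista : List Int) (k : Int) (s : Int) : List Int → Bool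
  | [] => false
  | i :: rest =>
      let s' := s + PySem.List.pyGetD lista i 0 - PySem.List.pyGetD lista (i - k) 0
      if s' = 0 then true else slideGo lista k s' rest

def funzione_alt (lista : List Int) (k : Int) : Bool :=
  let n : Int := lista.length
  if k > n then false
  else
    let s := (PySem.List.slice lista none (some k)).sum
    if s = 0 then true
    else slideGo lista k s (PySem.List.pyRange k n 1)

-- ===== PRECONDITION & SPEC =====
-- Pre_ excludes k ≤ 0: window length ≤ 0 is outside the function's natural domain, and there A
-- walks past the end of the list (IndexError) unless it happens upon a zero element first.
def Pre_funzione (lista : List Int) (k : Int) : Prop := 1 ≤ k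
instance (lista : List Int) (k : Int) : Decidable (Pre_funzione lista k) := by unfold Pre_funzione; infer_instance
def pvWitness_funzione : List Int × Int := ([1, -1, 2], 2)

def Spec_funzione (lista : List Int) (k : Int) (out : Bool) : Prop := out = funzione_alt lista k
instance (lista : List Int) (k : Int) (out : Bool) : Decidable (Spec_funzione lista k out) := by unfold Spec_funzione; infer_instance

-- ===== CLAIM (what is proved, stated in full; the proofs are below) =====
def Claim_equal_funzione : Prop := ∀ (lista : List Int) (k : Int), Dom_funzione lista k → Pre_funzione lista k → Spec_funzione lista k (funzione lista k)

-- ===== LEMMAS AND PROOFS =====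

-- windowed sum starting at a of length len
def winS (lista : List Int) (a len : Nat) : Int := ((lista.drop a).take len).sum

lemma winS_head (lista : List Int) (a len : Nat) (ha : a < lista.length) :
    winS lista a (len + 1) = lista.getD a 0 + winS lista (a + 1) len := by
  unfold winS
  rw [List.drop_eq_getElem_cons ha, List.take_succ_cons, List.sum_cons,
    List.getD_eq_getElem lista 0 ha]

lemma winS_last (lista : List Int) (a len : Nat) (h : a + len < lista.length) :
    winS lista a (len + 1) = winS lista a len + lista.getD (a + len) 0 := by
  unfold winS
  have hlt : len < (lista.drop a).length := by simp; omega
  rw [List.sum_take_succ _ _ hlt]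
  simp [List.getElem_drop, List.getD, List.getElem?_eq_getElem h]

lemma winS_slide (lista : List Int) (t k : Nat) (h : t + k < lista.length) :
    winS lista (t + 1) k = winS lista t k + lista.getD (t + k) 0 - lista.getD t 0 := by
  have h1 := winS_head lista t k (by omega)
  have h2 := winS_last lista t k h
  omega

-- A's inner fold sums the window
lemma foldA_sum (lista : List Int) : ∀ (len a : Nat) (init : Int), a + len ≤ lista.length →
    (PySem.List.pyRange ((a : Int)) ((a : Int) + (len : Int)) 1).foldl
      (fun t j => t + PySem.List.pyGetD lista j 0) init = init + winS lista a len := by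
  intro len
  induction len with
  | zero => intro a init _; simp [PySem.List.pyRange_one_eq_nil, winS]
  | succ m ih =>
      intro a init h
      rw [PySem.List.pyRange_one_cons (by omega)]
      simp only [List.foldl_cons]
      have : ((a : Int) + 1) = ((a + 1 : Nat) : Int) := by push_cast; ring
      rw [show (a : Int) + ((m : Nat) + 1 : Nat) = ((a + 1 : Nat) : Int) + (m : Int) by push_cast; ring]
      rw [this, ih (a + 1) _ (by omega)]
      rw [winS_head lista a m (by omega)]
      simp [PySem.List.pyGetD_natCast]
      ring

-- characterization of A's outer loop over an index range
lemma funzioneGo_char (lista : List Int) (k : Int) (k' : Nat) (hk : (k' : Int) = k)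
    (hk1 : 1 ≤ k') :
    ∀ (m a b : Nat), b - a ≤ m → (b : Int) ≤ (lista.length : Int) - k + 1 →
      (funzioneGo lista k (PySem.List.pyRange (a : Int) (b : Int) 1) = true ↔
        ∃ t : Nat, a ≤ t ∧ t < b ∧ winS lista t k' = 0) := by
  intro m
  induction m with
  | zero =>
      intro a b hm _
      have hba : b ≤ a := by omega
      rw [PySem.List.pyRange_one_eq_nil (by exact_mod_cast hba)]
      simp [funzioneGo]
      intro t h1 h2; omega
  | succ m ih =>
      intro a b hm hb
      by_cases hab : a < b
      · rw [PySem.List.pyRange_one_cons (by exact_mod_cast hab)]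
        have hak : (a : Int) + (k' : Int) ≤ (lista.length : Int) := by omega
        have han : a < lista.length := by omega
        simp only [funzioneGo]
        rw [show ((a : Int) + 1) = ((a + 1 : Nat) : Int) by push_cast; ring,
            show (k + (a : Int)) = ((a + 1 : Nat) : Int) + ((k' - 1 : Nat) : Int) by push_cast; omega,
            foldA_sum lista (k' - 1) (a + 1) _ (by omega),
            PySem.List.pyGetD_natCast]
        have hwin : lista.getD a 0 + winS lista (a + 1) (k' - 1) = winS lista a k' := by
          have := winS_head lista a (k' - 1) han
          rw [show k' - 1 + 1 = k' from by omega] at this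
          omega
        rw [hwin]
        by_cases h0 : winS lista a k' = 0
        · rw [if_pos h0]
          simp only [true_iff]
          exact ⟨a, le_refl a, hab, h0⟩
        · rw [if_neg h0]
          rw [ih (a + 1) b (by omega) hb]
          constructor
          · rintro ⟨t, h1, h2, h3⟩; exact ⟨t, by omega, h2, h3⟩
          · rintro ⟨t, h1, h2, h3⟩
            refine ⟨t, ?_, h2, h3⟩
            rcases Nat.eq_or_lt_of_le h1 with h | h
            · exact absurd (h ▸ h3) h0
            · omega
      · rw [PySem.List.pyRange_one_eq_nil (by exact_mod_cast (by omega : b ≤ a))]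
        simp [funzioneGo]
        intro t h1 h2; omega

-- characterization of B's sliding loop
lemma slideGo_char (lista : List Int) (k : Int) (k' : Nat) (hk : (k' : Int) = k) :
    ∀ (m i : Nat), lista.length - i ≤ m → k' ≤ i → i ≤ lista.length →
      (slideGo lista k (winS lista (i - k') k') (PySem.List.pyRange (i : Int) (lista.length : Int) 1) = true ↔
        ∃ t : Nat, i - k' < t ∧ t ≤ lista.length - k' ∧ winS lista t k' = 0) := by
  intro m
  induction m with
  | zero =>
      intro i hm hki hin
      have : lista.length ≤ i := by omega
      rw [PySem.List.pyRange_one_eq_nil (by exact_mod_cast this)]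
      simp [slideGo]
      intro t h1 h2; omega
  | succ m ih =>
      intro i hm hki hin
      by_cases hlt : i < lista.length
      · rw [PySem.List.pyRange_one_cons (by exact_mod_cast hlt)]
        simp only [slideGo]
        rw [PySem.List.pyGetD_natCast,
            show ((i : Int) - k) = ((i - k' : Nat) : Int) by omega,
            PySem.List.pyGetD_natCast]
        have hslide := winS_slide lista (i - k') k' (by omega)
        rw [show i - k' + 1 = i + 1 - k' from by omega,
            show i - k' + k' = i from by omega] at hslide
        by_cases h0 : winS lista (i + 1 - k') k' = 0
        · rw [if_pos (by omega)]
          simp only [true_iff]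
          exact ⟨i + 1 - k', by omega, by omega, h0⟩
        · rw [if_neg (by omega),
              show winS lista (i - k') k' + lista.getD i 0 - lista.getD (i - k') 0
                = winS lista (i + 1 - k') k' from by omega,
              show ((i : Int) + 1) = ((i + 1 : Nat) : Int) by push_cast; ring,
              show i + 1 - k' = (i + 1) - k' from rfl,
              ih (i + 1) (by omega) (by omega) (by omega)]
          constructor
          · rintro ⟨t, h1, h2, h3⟩; exact ⟨t, by omega, h2, h3⟩
          · rintro ⟨t, h1, h2, h3⟩
            refine ⟨t, ?_, h2, h3⟩
            rcases Nat.eq_or_lt_of_le (by omega : i - k' + 1 ≤ t) with h | h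
            · refine absurd ?_ h0
              rw [show i + 1 - k' = t from by omega]
              exact h3
            · omega
      · rw [PySem.List.pyRange_one_eq_nil (by exact_mod_cast (by omega : lista.length ≤ i))]
        simp [slideGo]
        intro t h1 h2; omega

-- ===== VERDICT (by name: the statement is the Claim_ definition above) =====
theorem funzione_spec : Claim_equal_funzione := by
  intro lista k _ hpre
  unfold Spec_funzione funzione funzione_alt
  have hk0 : 1 ≤ k := hpre
  set k' : Nat := k.toNat with hk'def
  have hk : (k' : Int) = k := Int.toNat_of_nonneg (by omega)
  have hk1 : 1 ≤ k' := by omega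
  by_cases hkn : k > (lista.length : Int)
  · rw [PySem.List.pyRange_one_eq_nil (by omega)]
    simp [funzioneGo, hkn]
  · simp only [if_neg hkn]
    have hkn' : k' ≤ lista.length := by omega
    have hA : funzioneGo lista k (PySem.List.pyRange (0 : Int) ((lista.length : Int) - k + 1) 1) = true ↔
        ∃ t : Nat, t ≤ lista.length - k' ∧ winS lista t k' = 0 := by
      rw [show ((lista.length : Int) - k + 1) = ((lista.length - k' + 1 : Nat) : Int) by push_cast; omega,
          show ((0 : Int)) = ((0 : Nat) : Int) from rfl,
          funzioneGo_char lista k k' hk hk1 (lista.length - k' + 1) 0 (lista.length - k' + 1)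
            (le_refl _) (by push_cast; omega)]
      constructor
      · rintro ⟨t, _, h2, h3⟩; exact ⟨t, by omega, h3⟩
      · rintro ⟨t, h1, h3⟩; exact ⟨t, by omega, by omega, h3⟩
    have hs : (PySem.List.slice lista none (some k)).sum = winS lista 0 k' := by
      rw [PySem.List.slice_to lista (by omega : (0:Int) ≤ k)]
      simp [winS, hk'def]
    rw [hs]
    by_cases h0 : winS lista 0 k' = 0
    · rw [if_pos h0]
      rw [hA.mpr ⟨0, by omega, h0⟩]
    · rw [if_neg h0]
      have hB := slideGo_char lista k k' hk (lista.length - k') k' (by omega) (le_refl _) hkn'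
      rw [Nat.sub_self, hk] at hB
      rw [Bool.eq_iff_iff, hA, hB]
      constructor
      · rintro ⟨t, h1, h3⟩
        refine ⟨t, ?_, by omega, h3⟩
        rcases Nat.eq_zero_or_pos t with h | h
        · exact absurd (h ▸ h3) h0
        · omega
      · rintro ⟨t, h1, h2, h3⟩; exact ⟨t, h2, h3⟩
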